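-- pv_equiv track=rewrite | github.com/Aureliolo/story-factory | src/utils/json_parser.py | _iterate_json_chars
-- ===== SOURCE A (Python) =====
-- def _iterate_json_chars(text: str) -> list[tuple[int, str, bool]]:
--     """Iterate through JSON string characters, tracking string context.
--
--     This helper function handles escape sequences properly and returns
--     character positions with their string context.
--
--     Args:
--         text: JSON string to iterate.
--
--     Yields:
--         Tuples of (index, character, in_string) for each non-escaped character.
--     """
--     result: list[tuple[int, str, bool]] = []
--     in_string = False
--     escape_next = False
--
--     for i, char in enumerate(text):
--         if escape_next:
--             escape_next = False
--             continue
--         if char == "\\":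
--             escape_next = True
--             continue
--         if char == '"':
--             in_string = not in_string
--             result.append((i, char, not in_string))  # Quote itself is at boundary
--             continue
--         result.append((i, char, in_string))
--
--     return result
-- ===== SOURCE B (Python) =====
-- def _iterate_json_chars(text: str) -> list[tuple[int, str, bool]]:
--     """Staged passes: strip escape pairs, then derive each character's string
--     context uniformly as the parity of the surviving quotes before it."""
--     # stage 1: survivors = (index, char) with every backslash+escaped-char pair removed
--     survivors: list[tuple[int, str]] = []
--     i = 0
--     n = len(text)
--     while i < n:
--         c = text[i]
--         if c == "\\":
--             i += 2
--         else:
--             survivors.append((i, c))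
--             i += 1
--     # stage 2: flag for each survivor = odd number of quotes strictly before it
--     flags: list[bool] = []
--     q = 0
--     for _, c in survivors:
--         flags.append(q % 2 == 1)
--         q += c == '"'
--     # stage 3: combine
--     return [(i, c, f) for (i, c), f in zip(survivors, flags)]
-- ===== Notes on version B (the rewrite author's own statement) =====
-- stated objective: alternative
-- what changed: Replaced the single stateful scan (in_string toggle + escape_next flag) by three staged passes: strip backslash-escape pairs by index jumps, then compute every character's context uniformly as the parity of surviving quotes before it (no toggle, no quote-boundary special case), then zip the two lists.
import Mathlib
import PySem

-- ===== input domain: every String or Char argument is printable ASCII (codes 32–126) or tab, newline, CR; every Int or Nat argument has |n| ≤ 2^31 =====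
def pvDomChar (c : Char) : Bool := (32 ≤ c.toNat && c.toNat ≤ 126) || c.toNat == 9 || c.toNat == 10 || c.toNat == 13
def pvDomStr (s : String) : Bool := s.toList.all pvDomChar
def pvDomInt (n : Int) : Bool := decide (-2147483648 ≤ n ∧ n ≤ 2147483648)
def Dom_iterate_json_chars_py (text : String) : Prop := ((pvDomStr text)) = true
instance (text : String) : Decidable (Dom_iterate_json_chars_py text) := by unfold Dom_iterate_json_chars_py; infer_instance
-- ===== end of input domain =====

-- B replaces A's stateful scan by three staged passes (strip escape pairs; quote-parity flags; zip) — alternative decomposition, same O(n) cost.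

-- ===== PORT A =====
-- for-loop over enumerate(text) with state (in_string, escape_next); result built by append (cons-recursion here).
def iterJsonA : List Char → Nat → Bool → Bool → List (Int × String × Bool)
  | [], _, _, _ => []
  | c :: rest, i, ins, esc =>
    if esc then iterJsonA rest (i + 1) ins false
    else if c = '\\' then iterJsonA rest (i + 1) ins true
    else if c = '"' then
      -- in_string = not in_string; append (i, char, not in_string)
      ((i : Int), c.toString, !(!ins)) :: iterJsonA rest (i + 1) (!ins) false
    else ((i : Int), c.toString, ins) :: iterJsonA rest (i + 1) ins false

def iterate_json_chars_py (text : String) : List (Int × String × Bool) :=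
  iterJsonA text.toList 0 false false

-- ===== PORT B =====
-- stage 1: while i < n, drop '\' and its escaped char (i += 2), keep (i, char) otherwise
def survB : List Char → Nat → List (Nat × Char)
  | [], _ => []
  | c :: rest, i =>
    if c = '\\' then
      match rest with
      | [] => []
      | _ :: rest' => survB rest' (i + 2)
    else (i, c) :: survB rest (i + 1)

-- stage 2: flags.append(q % 2 == 1); q += (c == '"')
def flagsB : List (Nat × Char) → Nat → List Bool
  | [], _ => []
  | (_, c) :: rest, q => decide (q % 2 = 1) :: flagsB rest (q + (if c = '"' then 1 else 0))

-- stage 3: [(i, c, f) for (i, c), f in zip(survivors, flags)]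
def iterate_json_chars_py_alt (text : String) : List (Int × String × Bool) :=
  List.zipWith (fun (p : Nat × Char) (f : Bool) => ((p.1 : Int), p.2.toString, f))
    (survB text.toList 0) (flagsB (survB text.toList 0) 0)

-- ===== PRECONDITION & SPEC =====
def Spec_iterate_json_chars_py (text : String) (out : List (Int × String × Bool)) : Prop := out = iterate_json_chars_py_alt text
instance (text : String) (out : List (Int × String × Bool)) : Decidable (Spec_iterate_json_chars_py text out) := by unfold Spec_iterate_json_chars_py; infer_instance

-- ===== CLAIM (what is proved, stated in full; the proofs are below) =====
def Claim_equal_iterate_json_chars_py : Prop := ∀ (text : String), Dom_iterate_json_chars_py text → Spec_iterate_json_chars_py text (iterate_json_chars_py text)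

-- ===== LEMMAS AND PROOFS =====

theorem parity_succ (q : Nat) : decide ((q + 1) % 2 = 1) = !decide (q % 2 = 1) := by
  rcases Nat.mod_two_eq_zero_or_one q with h | h <;> simp [Nat.add_mod, h]

-- Invariant: zipping survivors with parity flags from any quote count q equals A's scan
-- started with in_string = (q odd) and no pending escape.
theorem zip_surv_flags_eq_iterJsonA : ∀ (n : Nat) (cs : List Char), cs.length ≤ n →
    ∀ (i q : Nat),
      List.zipWith (fun (p : Nat × Char) (f : Bool) => ((p.1 : Int), p.2.toString, f))
        (survB cs i) (flagsB (survB cs i) q)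
      = iterJsonA cs i (decide (q % 2 = 1)) false := by
  intro n
  induction n with
  | zero =>
    intro cs h i q
    have : cs = [] := List.eq_nil_of_length_eq_zero (Nat.le_zero.mp h)
    subst this; rfl
  | succ n ih =>
    intro cs h i q
    cases cs with
    | nil => rfl
    | cons c rest =>
      simp only [List.length_cons, Nat.succ_le_succ_iff] at h
      by_cases hb : c = '\\'
      · cases rest with
        | nil => simp [survB, iterJsonA, hb]
        | cons d rest' =>
          simp only [List.length_cons] at h
          rw [survB.eq_def, iterJsonA.eq_def]
          simp only [hb, if_pos, Bool.false_eq_true, if_false, iterJsonA]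
          rw [show i + 1 + 1 = i + 2 from rfl]
          exact ih rest' (Nat.le_of_succ_le h) (i + 2) q
      · by_cases hq : c = '"'
        · subst hq
          have hrec := ih rest h (i + 1) (q + 1)
          rw [parity_succ q] at hrec
          rw [survB.eq_def, iterJsonA.eq_def]
          simp [flagsB, hb]
          simpa using hrec
        · have hrec := ih rest h (i + 1) q
          rw [survB.eq_def, iterJsonA.eq_def]
          simp [flagsB, hb, hq]
          simpa using hrec

-- ===== VERDICT (by name: the statement is the Claim_ definition above) =====
theorem iterate_json_chars_py_spec : Claim_equal_iterate_json_chars_py := by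
  intro text _
  unfold Spec_iterate_json_chars_py iterate_json_chars_py iterate_json_chars_py_alt
  exact (zip_surv_flags_eq_iterJsonA text.toList.length text.toList le_rfl 0 0).symm
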